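-- pv_equiv track=rewrite | github.com/Sassy-Buoy/hyper-param-optim-4-vector-field-clustering | plot/scatter_interactive.py | c_dict
-- ===== SOURCE A (Python) =====
-- def c_dict(labels, simulation_file_paths):
--     class_dict = {f"Class {lbl}": [] for lbl in set(labels) if lbl != -1}
--     class_dict["Outliers"] = []
--     image_dict = {f"Class {lbl}": [] for lbl in set(labels) if lbl != -1}
--     image_dict["Outliers"] = []
--
--     for index, path in enumerate(simulation_file_paths):
--         class_ = labels[index]
--         # find the png file with the index
--         img_path = f"data/field_images/{index}.png"
--         if class_ == -1:
--             class_dict["Outliers"].append(str(path))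
--             image_dict["Outliers"].append(img_path)
--         else:
--             class_dict[f"Class {class_}"].append(str(path))
--             image_dict[f"Class {class_}"].append(img_path)
--
--     return class_dict, image_dict
-- ===== SOURCE B (Python) =====
-- def c_dict(labels, simulation_file_paths):
--     # One pass builds an index table label -> list of positions; the two dicts are
--     # then assembled per label from that table instead of being grown entry by entry.
--     groups = {}
--     for i in range(len(simulation_file_paths)):
--         groups.setdefault(labels[i], []).append(i)
--
--     keys = [lbl for lbl in set(labels) if lbl != -1]
--     class_dict = {f"Class {lbl}": [str(simulation_file_paths[i]) for i in groups.get(lbl, [])]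
--                   for lbl in keys}
--     image_dict = {f"Class {lbl}": [f"data/field_images/{i}.png" for i in groups.get(lbl, [])]
--                   for lbl in keys}
--     class_dict["Outliers"] = [str(simulation_file_paths[i]) for i in groups.get(-1, [])]
--     image_dict["Outliers"] = [f"data/field_images/{i}.png" for i in groups.get(-1, [])]
--     return class_dict, image_dict
-- ===== Notes on version B (the rewrite author's own statement) =====
-- stated objective: alternative
-- what changed: Instead of seeding both dicts with empty lists and growing them entry by entry inside one enumerate loop, B makes a single pass that builds an index table label -> positions, then assembles class_dict and image_dict per label by comprehensions over that table.
import Mathlib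
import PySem

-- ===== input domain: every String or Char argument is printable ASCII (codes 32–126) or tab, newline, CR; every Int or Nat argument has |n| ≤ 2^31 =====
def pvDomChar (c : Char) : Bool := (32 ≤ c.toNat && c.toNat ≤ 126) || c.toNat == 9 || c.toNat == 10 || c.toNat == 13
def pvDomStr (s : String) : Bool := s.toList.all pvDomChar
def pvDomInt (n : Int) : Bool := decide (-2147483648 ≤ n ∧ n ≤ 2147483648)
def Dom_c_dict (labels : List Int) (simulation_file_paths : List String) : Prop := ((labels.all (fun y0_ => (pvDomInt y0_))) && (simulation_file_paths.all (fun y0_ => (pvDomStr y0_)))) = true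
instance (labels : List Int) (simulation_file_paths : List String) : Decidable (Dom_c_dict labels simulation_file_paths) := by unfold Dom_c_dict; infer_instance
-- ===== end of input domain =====

-- B re-groups via an index table (label -> positions) built in one pass, then assembles both
-- dicts per label, instead of A's seeding-empty-lists-and-appending inside one enumerate loop.


-- ===== PORT A =====
-- f"Class {lbl}"
def pvClassKey (lbl : Int) : String := "Class " ++ PySem.Int.toStr lbl
-- f"data/field_images/{i}.png"
def pvImgPath (i : Int) : String := "data/field_images/" ++ PySem.Int.toStr i ++ ".png"

def c_dict (labels : List Int) (simulation_file_paths : List String) : (List (String × List String)) × (List (String × List String)) :=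
  -- class_dict = {f"Class {lbl}": [] for lbl in set(labels) if lbl != -1}; class_dict["Outliers"] = []
  let classInit : PySem.Dict String (List String) :=
    ((PySem.Set.ofList labels).filter (fun lbl => lbl != -1)).foldl
      (fun d lbl => d.insert (pvClassKey lbl) []) PySem.Dict.empty
  let classDict0 := classInit.insert "Outliers" []
  -- image_dict built by the same (repeated) comprehension
  let imageInit : PySem.Dict String (List String) :=
    ((PySem.Set.ofList labels).filter (fun lbl => lbl != -1)).foldl
      (fun d lbl => d.insert (pvClassKey lbl) []) PySem.Dict.empty
  let imageDict0 := imageInit.insert "Outliers" []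
  -- for index, path in enumerate(simulation_file_paths): …  (labels[index]: IndexError outside Pre_)
  let res := (PySem.List.enumerate simulation_file_paths).foldl
    (fun st p =>
      let class_ := PySem.List.pyGetD labels p.1 0
      let imgPath := pvImgPath p.1
      if class_ == -1 then
        (st.1.modify "Outliers" [] (fun v => v ++ [p.2]),
         st.2.modify "Outliers" [] (fun v => v ++ [imgPath]))
      else
        (st.1.modify (pvClassKey class_) [] (fun v => v ++ [p.2]),
         st.2.modify (pvClassKey class_) [] (fun v => v ++ [imgPath])))
    (classDict0, imageDict0)
  (res.1.items, res.2.items)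

-- ===== PORT B =====
def c_dict_alt (labels : List Int) (simulation_file_paths : List String) : (List (String × List String)) × (List (String × List String)) :=
  -- groups.setdefault(labels[i], []).append(i)  (labels[i]: IndexError outside Pre_)
  let groups : PySem.Dict Int (List Int) :=
    (PySem.List.pyRange 0 simulation_file_paths.length).foldl
      (fun g i => g.modify (PySem.List.pyGetD labels i 0) [] (fun v => v ++ [i])) PySem.Dict.empty
  let keys := (PySem.Set.ofList labels).filter (fun lbl => lbl != -1)
  -- simulation_file_paths[i]: i comes from range(len(simulation_file_paths)), always in range
  let classD := (keys.foldl (fun d lbl =>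
      d.insert (pvClassKey lbl) ((groups.getD lbl []).map (fun i => PySem.List.pyGetD simulation_file_paths i "")))
      PySem.Dict.empty).insert "Outliers" ((groups.getD (-1) []).map (fun i => PySem.List.pyGetD simulation_file_paths i ""))
  let imageD := (keys.foldl (fun d lbl =>
      d.insert (pvClassKey lbl) ((groups.getD lbl []).map (fun i => pvImgPath i)))
      PySem.Dict.empty).insert "Outliers" ((groups.getD (-1) []).map (fun i => pvImgPath i))
  (classD.items, imageD.items)

-- ===== PRECONDITION & SPEC =====
-- Pre_ excludes only inputs where A raises IndexError: labels[index] with more paths than labels.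
def Pre_c_dict (labels : List Int) (simulation_file_paths : List String) : Prop :=
  simulation_file_paths.length ≤ labels.length
instance (labels : List Int) (simulation_file_paths : List String) : Decidable (Pre_c_dict labels simulation_file_paths) := by unfold Pre_c_dict; infer_instance
def pvWitness_c_dict : List Int × List String := ([0, -1, 2, 0], ["a", "b", "c"])

def Spec_c_dict (labels : List Int) (simulation_file_paths : List String) (out : (List (String × List String)) × (List (String × List String))) : Prop := out = c_dict_alt labels simulation_file_paths
instance (labels : List Int) (simulation_file_paths : List String) (out : (List (String × List String)) × (List (String × List String))) : Decidable (Spec_c_dict labels simulation_file_paths out) := by unfold Spec_c_dict; infer_instance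

-- ===== CLAIM (what is proved, stated in full; the proofs are below) =====
def Claim_equal_c_dict : Prop := ∀ (labels : List Int) (simulation_file_paths : List String), Dom_c_dict labels simulation_file_paths → Pre_c_dict labels simulation_file_paths → Spec_c_dict labels simulation_file_paths (c_dict labels simulation_file_paths)

-- ===== LEMMAS AND PROOFS =====

/-! ### str(n) is injective, and never "Outliers" -/

theorem pv_core_succ (b f n : Nat) (ds : List Char) :
    Nat.toDigitsCore b (f+1) n ds =
      if n / b = 0 then (n % b).digitChar :: ds else Nat.toDigitsCore b f (n / b) ((n % b).digitChar :: ds) := by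
  conv_lhs => rw [Nat.toDigitsCore]

theorem pv_toDigitsCore_append (f : Nat) : ∀ (n : Nat) (l : List Char),
    Nat.toDigitsCore 10 f n l = Nat.toDigitsCore 10 f n [] ++ l := by
  induction f with
  | zero => intro n l; simp [Nat.toDigitsCore]
  | succ f ih =>
    intro n l
    rw [pv_core_succ, pv_core_succ]
    by_cases h : n / 10 = 0
    · simp [h]
    · rw [if_neg h, if_neg h, ih (n/10) ((n % 10).digitChar :: l), ih (n/10) [(n % 10).digitChar]]
      simp

def pvVal (l : List Char) : Nat := l.foldl (fun a c => a * 10 + (c.toNat - 48)) 0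

theorem pv_digitChar_toNat (d : Nat) (h : d < 10) : (Nat.digitChar d).toNat = 48 + d := by
  interval_cases d <;> decide

theorem pv_digitChar_ne_dash (d : Nat) (h : d < 10) : Nat.digitChar d ≠ '-' := by
  interval_cases d <;> decide

theorem pv_pvVal_append (xs : List Char) (c : Char) :
    pvVal (xs ++ [c]) = pvVal xs * 10 + (c.toNat - 48) := by
  simp [pvVal, List.foldl_append]

theorem pv_pvVal_toDigitsCore (f : Nat) : ∀ n : Nat, n < f → pvVal (Nat.toDigitsCore 10 f n []) = n := by
  induction f with
  | zero => omega
  | succ f ih =>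
    intro n hn
    rw [pv_core_succ]
    by_cases h : n / 10 = 0
    · rw [if_pos h]
      have h10 : n < 10 := by omega
      have : pvVal [(n % 10).digitChar] = n % 10 := by
        simp [pvVal, pv_digitChar_toNat _ (Nat.mod_lt _ (by norm_num))]
      rw [this]; omega
    · rw [if_neg h, pv_toDigitsCore_append, pv_pvVal_append,
        ih (n / 10) (by omega), pv_digitChar_toNat _ (Nat.mod_lt _ (by norm_num))]
      omega

theorem pv_pvVal_toDigits (n : Nat) : pvVal (Nat.toDigits 10 n) = n :=
  pv_pvVal_toDigitsCore (n+1) n (by omega)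

theorem pv_mem_toDigitsCore (f : Nat) : ∀ (n : Nat) (l : List Char) (c : Char),
    c ∈ Nat.toDigitsCore 10 f n l → c ∈ l ∨ ∃ d, d < 10 ∧ c = Nat.digitChar d := by
  induction f with
  | zero => intro n l c hc; simp [Nat.toDigitsCore] at hc; exact Or.inl hc
  | succ f ih =>
    intro n l c hc
    rw [pv_core_succ] at hc
    by_cases h : n / 10 = 0
    · rw [if_pos h] at hc
      rcases List.mem_cons.mp hc with h1 | h1
      · exact Or.inr ⟨n % 10, Nat.mod_lt _ (by norm_num), h1⟩
      · exact Or.inl h1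
    · rw [if_neg h] at hc
      rcases ih _ _ _ hc with h1 | h1
      · rcases List.mem_cons.mp h1 with h2 | h2
        · exact Or.inr ⟨n % 10, Nat.mod_lt _ (by norm_num), h2⟩
        · exact Or.inl h2
      · exact Or.inr h1

theorem pv_dash_not_mem_toDigits (n : Nat) : '-' ∉ Nat.toDigits 10 n := by
  intro h
  rcases pv_mem_toDigitsCore _ _ _ _ h with h1 | ⟨d, hd, h2⟩
  · simp at h1
  · exact pv_digitChar_ne_dash d hd h2.symm

theorem pv_toDigits_inj (a b : Nat) (h : Nat.toDigits 10 a = Nat.toDigits 10 b) : a = b := by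
  have := pv_pvVal_toDigits a; rw [h, pv_pvVal_toDigits b] at this; omega

theorem pv_toChars_inj (a b : Int) (h : PySem.Int.toChars a = PySem.Int.toChars b) : a = b := by
  unfold PySem.Int.toChars at h
  by_cases ha : a < 0 <;> by_cases hb : b < 0
  · rw [if_pos ha, if_pos hb] at h
    simp only [List.cons.injEq, true_and] at h
    have := pv_toDigits_inj _ _ h; omega
  · rw [if_pos ha, if_neg hb] at h
    exact absurd (h ▸ List.mem_cons_self) (pv_dash_not_mem_toDigits b.toNat)
  · rw [if_neg ha, if_pos hb] at h
    exact absurd (h.symm ▸ List.mem_cons_self) (pv_dash_not_mem_toDigits a.toNat)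
  · rw [if_neg ha, if_neg hb] at h
    have := pv_toDigits_inj _ _ h; omega

theorem pvClassKey_inj : Function.Injective pvClassKey := by
  intro a b h
  unfold pvClassKey at h
  apply pv_toChars_inj
  have h2 := congrArg String.toList h
  rw [String.toList_append, String.toList_append, PySem.Int.toList_toStr, PySem.Int.toList_toStr] at h2
  exact List.append_cancel_left h2

theorem pvClassKey_ne_out (a : Int) : pvClassKey a ≠ "Outliers" := by
  unfold pvClassKey
  intro h
  have h2 := congrArg String.toList h
  rw [String.toList_append, PySem.Int.toList_toStr] at h2
  rw [show "Class ".toList = 'C' :: "lass ".toList from by decide,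
      show "Outliers".toList = 'O' :: "utliers".toList from by decide, List.cons_append] at h2
  injection h2 with h3 _
  exact absurd h3 (by decide)

/-! ### dict items under the two fold shapes -/

theorem pv_find?_of_nodup {κ ν : Type} [BEq κ] [LawfulBEq κ] (its : List (κ × ν)) (k : κ)
    (hnd : (its.map Prod.fst).Nodup) (q : κ × ν) (hq : q ∈ its) (hk : q.1 = k) :
    its.find? (fun p => p.1 == k) = some q := by
  induction its with
  | nil => simp at hq
  | cons a its ih =>
    simp only [List.map_cons, List.nodup_cons] at hnd
    rcases List.mem_cons.mp hq with rfl | hq'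
    · simp [hk]
    · have hne : (a.1 == k) = false := by
        apply beq_eq_false_iff_ne.mpr
        intro hak
        exact hnd.1 (by rw [hak, ← hk]; exact List.mem_map_of_mem hq')
      rw [List.find?_cons, hne]
      exact ih hnd.2 hq'

theorem pv_items_modify {κ ν : Type} [BEq κ] [LawfulBEq κ] (d : PySem.Dict κ (List ν))
    (hnd : (d.items.map Prod.fst).Nodup) (k : κ) (hc : d.contains k = true) (x : ν) :
    (d.modify k [] (fun v => v ++ [x])).items
      = d.items.map (fun q => if q.1 == k then (q.1, q.2 ++ [x]) else q) := by
  unfold PySem.Dict.modify PySem.Dict.insert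
  rw [if_pos (by exact hc)]
  apply List.map_congr_left
  intro p hp
  by_cases hpk : p.1 = k
  · have hfind : d.items.find? (fun q => q.1 == k) = some p := pv_find?_of_nodup d.items k hnd p hp hpk
    simp [hpk, PySem.Dict.getD, PySem.Dict.get?, hfind]
  · simp [beq_eq_false_iff_ne.mpr hpk]

theorem pv_foldl_modify_items {β : Type} (l : List β) (key : β → String) (val : β → String) :
    ∀ (d : PySem.Dict String (List String)),
    (d.items.map Prod.fst).Nodup → (∀ p ∈ l, d.contains (key p) = true) →
    (l.foldl (fun d p => d.modify (key p) [] (fun v => v ++ [val p])) d).items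
      = d.items.map (fun kv => (kv.1, kv.2 ++ (l.filter (fun p => key p == kv.1)).map val)) := by
  induction l with
  | nil => intro d hnd hall; simp
  | cons p l ih =>
    intro d hnd hall
    rw [List.foldl_cons]
    set d' := d.modify (key p) [] (fun v => v ++ [val p]) with hd'
    have hitems : d'.items = d.items.map (fun q => if q.1 == key p then (q.1, q.2 ++ [val p]) else q) :=
      pv_items_modify d hnd (key p) (hall p List.mem_cons_self) (val p)
    have hfst : d'.items.map Prod.fst = d.items.map Prod.fst := by
      rw [hitems, List.map_map]
      apply List.map_congr_left
      intro q _
      simp only [Function.comp]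
      by_cases h : (q.1 == key p) = true
      · rw [if_pos h]
      · rw [if_neg h]
    have hnd' : (d'.items.map Prod.fst).Nodup := by rw [hfst]; exact hnd
    have hall' : ∀ q ∈ l, d'.contains (key q) = true := by
      intro q hq
      rw [PySem.Dict.contains_modify]
      simp [hall q (List.mem_cons_of_mem _ hq)]
    rw [ih d' hnd' hall', hitems, List.map_map]
    apply List.map_congr_left
    intro kv _
    by_cases h : key p == kv.1
    · have hk : key p = kv.1 := eq_of_beq h
      simp only [Function.comp, hk, beq_self_eq_true, if_pos, List.filter_cons]
      simp [List.append_assoc]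
    · have hne : key p ≠ kv.1 := by simpa [beq_iff_eq] using h
      have h2 : (kv.1 == key p) = false := beq_eq_false_iff_ne.mpr (Ne.symm hne)
      have h3 : (key p == kv.1) = false := beq_eq_false_iff_ne.mpr hne
      simp only [Function.comp, List.filter_cons, h3]
      simp [h2]

theorem pv_foldl_insert_items (ks : List Int) (f : Int → List String) :
    ∀ (d : PySem.Dict String (List String)),
    (∀ l ∈ ks, d.contains (pvClassKey l) = false) → (ks.map pvClassKey).Nodup →
    (ks.foldl (fun d l => d.insert (pvClassKey l) (f l)) d).items
      = d.items ++ ks.map (fun l => (pvClassKey l, f l)) := by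
  induction ks with
  | nil => intro d _ _; simp
  | cons k ks ih =>
    intro d hfresh hnd
    simp only [List.map_cons, List.nodup_cons] at hnd
    rw [List.foldl_cons]
    have hstep : (d.insert (pvClassKey k) (f k)).items = d.items ++ [(pvClassKey k, f k)] := by
      unfold PySem.Dict.insert
      rw [if_neg (by rw [hfresh k List.mem_cons_self]; exact Bool.false_ne_true)]
    have hfresh' : ∀ l ∈ ks, (d.insert (pvClassKey k) (f k)).contains (pvClassKey l) = false := by
      intro l hl
      unfold PySem.Dict.contains
      rw [hstep, List.any_append]
      have h1 : d.items.any (fun p => p.1 == pvClassKey l) = false := hfresh l (List.mem_cons_of_mem _ hl)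
      have h2 : (pvClassKey k == pvClassKey l) = false := by
        apply beq_eq_false_iff_ne.mpr
        intro he
        exact hnd.1 (he ▸ List.mem_map_of_mem hl)
      simp at h1
      simp [h2]
      exact h1
    rw [ih _ hfresh' hnd.2, hstep]
    simp

/-! ### enumerate facts -/

theorem pv_enum_bounds {α : Type} (xs : List α) : ∀ (s : Int) (p : Int × α),
    p ∈ PySem.List.enumerate xs s → s ≤ p.1 ∧ p.1 < s + xs.length := by
  induction xs with
  | nil => intro s p hp; simp [PySem.List.enumerate_nil] at hp
  | cons x xs ih =>
    intro s p hp
    rw [PySem.List.enumerate_cons] at hp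
    rcases List.mem_cons.mp hp with rfl | hp'
    · refine ⟨le_refl _, ?_⟩; simp
    · have := ih (s+1) p hp'
      simp only [List.length_cons]
      push_cast
      omega

theorem pv_enum_getD {α : Type} (xs : List α) : ∀ (s : Int) (dd : α) (p : Int × α),
    p ∈ PySem.List.enumerate xs s → PySem.List.pyGetD xs (p.1 - s) dd = p.2 := by
  induction xs with
  | nil => intro s dd p hp; simp [PySem.List.enumerate_nil] at hp
  | cons x xs ih =>
    intro s dd p hp
    rw [PySem.List.enumerate_cons] at hp
    rcases List.mem_cons.mp hp with rfl | hp'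
    · simp only [sub_self]
      rw [PySem.List.pyGetD_of_nonneg _ _ le_rfl]
      rfl
    · have hb := pv_enum_bounds xs (s+1) p hp'
      have ihh := ih (s+1) dd p hp'
      rw [PySem.List.pyGetD_of_nonneg _ _ (by omega)] at ihh ⊢
      have ht : (p.1 - s).toNat = (p.1 - (s+1)).toNat + 1 := by omega
      rw [ht]
      simpa using ihh

theorem pv_insert_fresh {κ ν : Type} [BEq κ] (d : PySem.Dict κ ν) (k : κ) (v : ν)
    (h : d.contains k = false) : (d.insert k v).items = d.items ++ [(k, v)] := by
  unfold PySem.Dict.insert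
  rw [if_neg (by rw [h]; exact Bool.false_ne_true)]

/-! ### assembly -/

-- the key a loop iteration with label c touches
def pvKF (c : Int) : String := if c == -1 then "Outliers" else pvClassKey c

theorem pv_kf_eq_key (t : Int) (ht : t ≠ -1) (c : Int) :
    (pvKF c == pvClassKey t) = (c == t) := by
  unfold pvKF
  by_cases hc : c = -1
  · subst hc
    rw [if_pos (by simp)]
    have h1 : ("Outliers" == pvClassKey t) = false :=
      beq_eq_false_iff_ne.mpr (fun h => pvClassKey_ne_out t h.symm)
    have h2 : ((-1 : Int) == t) = false := beq_eq_false_iff_ne.mpr (fun h => ht h.symm)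
    rw [h1, h2]
  · rw [if_neg (by simpa using hc)]
    by_cases he : c = t
    · subst he; simp
    · rw [beq_eq_false_iff_ne.mpr (fun h => he (pvClassKey_inj h)),
        beq_eq_false_iff_ne.mpr he]

theorem pv_kf_eq_out (c : Int) : (pvKF c == "Outliers") = (c == -1) := by
  unfold pvKF
  by_cases hc : c = -1
  · subst hc; simp
  · rw [if_neg (by simpa using hc), beq_eq_false_iff_ne.mpr (pvClassKey_ne_out c),
      beq_eq_false_iff_ne.mpr hc]

theorem c_dict_spec_aux (labels : List Int) (paths : List String)
    (hpre : paths.length ≤ labels.length) :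
    c_dict labels paths = c_dict_alt labels paths := by
  have hkeyNodup : (((PySem.Set.ofList labels).filter (fun lbl => lbl != -1)).map pvClassKey).Nodup :=
    ((PySem.Set.nodup_ofList labels).filter _).map pvClassKey_inj
  set keysList := (PySem.Set.ofList labels).filter (fun lbl => lbl != -1) with hKdef
  -- items of a seeded-then-"Outliers" dict
  have hbuild : ∀ (fv : Int → List String) (v : List String),
      ((keysList.foldl (fun d lbl => d.insert (pvClassKey lbl) (fv lbl)) PySem.Dict.empty).insert "Outliers" v).items
        = keysList.map (fun l => (pvClassKey l, fv l)) ++ [("Outliers", v)] := by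
    intro fv v
    have hitems := pv_foldl_insert_items keysList fv PySem.Dict.empty
      (fun l _ => by simp [PySem.Dict.contains, PySem.Dict.empty]) hkeyNodup
    have hnotc : (keysList.foldl (fun d lbl => d.insert (pvClassKey lbl) (fv lbl)) PySem.Dict.empty).contains "Outliers" = false := by
      simp only [PySem.Dict.contains, hitems]
      rw [List.any_eq_false]
      intro x hx
      simp only [List.nil_append, PySem.Dict.empty, List.mem_map] at hx
      obtain ⟨l, _, rfl⟩ := hx
      simp [pvClassKey_ne_out l]
    rw [pv_insert_fresh _ _ _ hnotc, hitems]
    simp [PySem.Dict.empty]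
  set E := PySem.List.enumerate paths with hEdef
  have hmemlab : ∀ p ∈ E, PySem.List.pyGetD labels p.1 0 ∈ labels := by
    intro p hp
    have hb := pv_enum_bounds paths 0 p hp
    rw [PySem.List.pyGetD_of_nonneg _ _ hb.1]
    have hlt : p.1.toNat < labels.length := by
      have := hb.2; omega
    rw [List.getD_eq_getElem _ _ hlt]
    exact List.getElem_mem _
  have hcont : ∀ (fv : Int → List String) (v : List String), ∀ p ∈ E,
      ((keysList.foldl (fun d lbl => d.insert (pvClassKey lbl) (fv lbl)) PySem.Dict.empty).insert "Outliers" v).contains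
        (pvKF (PySem.List.pyGetD labels p.1 0)) = true := by
    intro fv v p hp
    simp only [PySem.Dict.contains, hbuild fv v, List.any_append, List.any_map]
    by_cases hc : PySem.List.pyGetD labels p.1 0 = -1
    · have : pvKF (PySem.List.pyGetD labels p.1 0) = "Outliers" := by
        unfold pvKF; rw [if_pos (by simpa using hc)]
      rw [this]
      simp
    · have hk : pvKF (PySem.List.pyGetD labels p.1 0) = pvClassKey (PySem.List.pyGetD labels p.1 0) := by
        unfold pvKF; rw [if_neg (by simpa using hc)]
      rw [hk]
      have hmem : PySem.List.pyGetD labels p.1 0 ∈ keysList := by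
        rw [hKdef]
        exact List.mem_filter.mpr ⟨(PySem.Set.mem_ofList labels _).mpr (hmemlab p hp), by simpa using hc⟩
      apply Bool.or_eq_true_iff.mpr
      left
      exact List.any_eq_true.mpr ⟨_, hmem, by simp⟩
  -- the A-side loop, rewritten to a uniform key function and split into the two dicts
  have hstepeq : (fun (st : PySem.Dict String (List String) × PySem.Dict String (List String)) (p : Int × String) =>
        let class_ := PySem.List.pyGetD labels p.1 0
        let imgPath := pvImgPath p.1
        if class_ == -1 then
          (st.1.modify "Outliers" [] (fun v => v ++ [p.2]),
           st.2.modify "Outliers" [] (fun v => v ++ [imgPath]))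
        else
          (st.1.modify (pvClassKey class_) [] (fun v => v ++ [p.2]),
           st.2.modify (pvClassKey class_) [] (fun v => v ++ [imgPath])))
      = (fun st p =>
          (st.1.modify (pvKF (PySem.List.pyGetD labels p.1 0)) [] (fun v => v ++ [p.2]),
           st.2.modify (pvKF (PySem.List.pyGetD labels p.1 0)) [] (fun v => v ++ [pvImgPath p.1]))) := by
    funext st p
    unfold pvKF
    by_cases h : PySem.List.pyGetD labels p.1 0 == -1 <;> simp [h]
  -- groups.getD
  have hgroups : ∀ t : Int,
      ((PySem.List.pyRange 0 paths.length).foldl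
        (fun g i => g.modify (PySem.List.pyGetD labels i 0) [] (fun v => v ++ [i])) PySem.Dict.empty).getD t []
      = (E.filter (fun p => PySem.List.pyGetD labels p.1 0 == t)).map (fun p => p.1) := by
    intro t
    have hr : PySem.List.pyRange 0 (paths.length : Int) = E.map (fun p => p.1) := by
      rw [hEdef, PySem.List.map_fst_enumerate]
      norm_num
    rw [hr, List.foldl_map,
      show (fun (g : PySem.Dict Int (List Int)) (p : Int × String) =>
            g.modify (PySem.List.pyGetD labels p.1 0) [] (fun v => v ++ [p.1]))
          = (fun g p => ((fun (d : PySem.Dict Int (List Int)) (q : Int × Int) => d.modify q.1 [] (fun x => x ++ [q.2])) g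
              ((fun p : Int × String => (PySem.List.pyGetD labels p.1 0, p.1)) p))) from rfl,
      ← List.foldl_map (f := fun p : Int × String => (PySem.List.pyGetD labels p.1 0, p.1))
        (g := fun (d : PySem.Dict Int (List Int)) (q : Int × Int) => d.modify q.1 [] fun x => x ++ [q.2]),
      PySem.Dict.getD_foldl_modify_append, List.filter_map, List.map_map]
    simp only [PySem.Dict.getD, PySem.Dict.get?, PySem.Dict.empty, List.find?_nil, Option.map_none,
      Option.getD_none, List.nil_append, Function.comp_def]
  have hval : ∀ p ∈ E, PySem.List.pyGetD paths p.1 "" = p.2 := by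
    intro p hp
    have := pv_enum_getD paths 0 "" p hp
    simpa using this
  -- now compute both sides
  unfold c_dict c_dict_alt
  simp only []
  rw [hstepeq, PySem.List.foldl_prod_mk
    (f := fun (d : PySem.Dict String (List String)) (p : Int × String) =>
      d.modify (pvKF (PySem.List.pyGetD labels p.1 0)) [] fun v => v ++ [p.2])
    (g := fun (d : PySem.Dict String (List String)) (p : Int × String) =>
      d.modify (pvKF (PySem.List.pyGetD labels p.1 0)) [] fun v => v ++ [pvImgPath p.1])]
  have hA : ∀ (val : Int × String → String),
      (E.foldl (fun d p => d.modify (pvKF (PySem.List.pyGetD labels p.1 0)) [] (fun v => v ++ [val p]))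
        ((keysList.foldl (fun d lbl => d.insert (pvClassKey lbl) []) PySem.Dict.empty).insert "Outliers" [])).items
      = keysList.map (fun l => (pvClassKey l, (E.filter (fun p => PySem.List.pyGetD labels p.1 0 == l)).map val))
        ++ [("Outliers", (E.filter (fun p => PySem.List.pyGetD labels p.1 0 == -1)).map val)] := by
    intro val
    rw [pv_foldl_modify_items E (fun p => pvKF (PySem.List.pyGetD labels p.1 0)) val _
      (by rw [hbuild (fun _ => []) []]
          simp only [List.map_append, List.map_map, List.map_cons, List.map_nil]
          refine List.Nodup.append (by simpa using hkeyNodup) (by simp) ?_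
          intro a ha
          simp only [List.mem_map] at ha
          obtain ⟨l, _, rfl⟩ := ha
          simp [pvClassKey_ne_out l])
      (hcont (fun _ => []) [])]
    rw [hbuild (fun _ => []) []]
    rw [List.map_append, List.map_map]
    congr 1
    · apply List.map_congr_left
      intro l hl
      have hl1 : l ≠ -1 := by
        rw [hKdef] at hl
        have := (List.mem_filter.mp hl).2
        simpa using this
      simp only [Function.comp, List.nil_append]
      congr 1
      exact congrArg (List.map val) (List.filter_congr (fun p _ => pv_kf_eq_key l hl1 _))
    · simp only [List.map_cons, List.map_nil, List.nil_append]
      exact congrArg (fun x => [("Outliers", x)])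
        (congrArg (List.map val) (List.filter_congr (fun p _ => pv_kf_eq_out _)))
  rw [hA (fun p => p.2), hA (fun p => pvImgPath p.1)]
  have hB : ∀ (bval : Int → String) (t : Int),
      (((E.filter (fun p => PySem.List.pyGetD labels p.1 0 == t)).map (fun p => p.1)).map bval)
      = (E.filter (fun p => PySem.List.pyGetD labels p.1 0 == t)).map (fun p => bval p.1) := by
    intro bval t
    rw [List.map_map]
    rfl
  rw [Prod.mk.injEq]
  refine ⟨?_, ?_⟩
  · rw [hbuild (fun lbl => (((PySem.List.pyRange 0 paths.length).foldl
        (fun g i => g.modify (PySem.List.pyGetD labels i 0) [] (fun v => v ++ [i])) PySem.Dict.empty).getD lbl []).map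
          (fun i => PySem.List.pyGetD paths i ""))]
    congr 1
    · apply List.map_congr_left
      intro l hl
      have hl1 : l ≠ -1 := by rw [hKdef] at hl; simpa using (List.mem_filter.mp hl).2
      rw [hgroups l, hB]
      refine congrArg (fun x => (pvClassKey l, x)) ?_
      apply List.map_congr_left
      intro p hp
      exact (hval p (List.mem_of_mem_filter hp)).symm
    · rw [hgroups (-1), hB]
      refine congrArg (fun x => [("Outliers", x)]) ?_
      apply List.map_congr_left
      intro p hp
      exact (hval p (List.mem_of_mem_filter hp)).symm
  · rw [hbuild (fun lbl => (((PySem.List.pyRange 0 paths.length).foldl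
        (fun g i => g.modify (PySem.List.pyGetD labels i 0) [] (fun v => v ++ [i])) PySem.Dict.empty).getD lbl []).map
          (fun i => pvImgPath i))]
    congr 1
    · apply List.map_congr_left
      intro l hl
      rw [hgroups l, hB]
    · rw [hgroups (-1), hB]

-- ===== VERDICT (by name: the statement is the Claim_ definition above) =====
theorem c_dict_spec : Claim_equal_c_dict := by
  intro labels paths _hdom hpre
  unfold Spec_c_dict
  exact c_dict_spec_aux labels paths hpre
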